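-- pv_equiv track=rewrite | github.com/vasyanch/stepik | Linear_algebra/mnk.py | mnk_mat
-- ===== SOURCE A (Python) =====
-- def mnk_mat(matrix_, n, m):
--     ans = [0]*m
--     for w in range(m):
--         line = [0]*(m + 1)
--         for p in range(m+1):
--             el = 0
--             for _ in range(n):
--                 el += matrix_[_][p] * matrix_[_][w]
--             line[p] = el
--         ans[w] = line
--     return ans, m, m
-- ===== SOURCE B (Python) =====
-- def mnk_mat(matrix_, n, m):
--     if m <= 0:
--         return [], m, m
--     cols = [[matrix_[r][j] for r in range(n)] for j in range(m + 1)]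
--
--     def dot(xs, ys):
--         return sum(x * y for x, y in zip(xs, ys))
--
--     ans = []
--     for w in range(m):
--         # mirror the already-computed lower part, then dot only the new half
--         row = [ans[p][w] for p in range(w)] + [dot(cols[p], cols[w]) for p in range(w, m + 1)]
--         ans.append(row)
--     return ans, m, m
-- ===== Notes on version B (the rewrite author's own statement) =====
-- stated objective: faster
-- what changed: B transposes the matrix into column lists once, computes only the upper half of each Gram row as column dot products, and fills the lower part of each row by mirroring the symmetric entries already computed, instead of A's triple loop that recomputes every dot product with per-element double indexing.
import Mathlib
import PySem

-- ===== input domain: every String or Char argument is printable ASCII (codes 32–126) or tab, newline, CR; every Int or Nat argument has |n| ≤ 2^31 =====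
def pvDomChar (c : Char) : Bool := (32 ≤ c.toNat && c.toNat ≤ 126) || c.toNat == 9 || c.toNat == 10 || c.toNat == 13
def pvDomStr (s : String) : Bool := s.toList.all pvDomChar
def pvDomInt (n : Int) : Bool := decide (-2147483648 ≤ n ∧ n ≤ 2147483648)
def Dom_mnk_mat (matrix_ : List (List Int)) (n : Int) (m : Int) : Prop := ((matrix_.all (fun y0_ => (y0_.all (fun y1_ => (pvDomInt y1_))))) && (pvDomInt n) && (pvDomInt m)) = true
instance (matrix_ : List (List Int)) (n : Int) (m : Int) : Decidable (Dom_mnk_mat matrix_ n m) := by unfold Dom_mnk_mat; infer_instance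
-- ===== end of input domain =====

-- B builds the columns once and computes only half the Gram dot products, mirroring the symmetric entries (objective: fewer dot products by symmetry).

-- ===== PORT A =====
-- el = 0; for _ in range(n): el += matrix_[_][p] * matrix_[_][w]
def pvDotA (matrix_ : List (List Int)) (n p w : Int) : Int :=
  (PySem.List.pyRange 0 n 1).foldl
    (fun el r =>
      el + PySem.List.pyGetD (PySem.List.pyGetD matrix_ r []) p 0
         * PySem.List.pyGetD (PySem.List.pyGetD matrix_ r []) w 0) 0

def mnk_mat (matrix_ : List (List Int)) (n : Int) (m : Int) : List (List Int) × Int × Int :=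
  let ans :=
    (PySem.List.pyRange 0 m 1).foldl
      (fun ans w =>
        let line :=
          (PySem.List.pyRange 0 (m + 1) 1).foldl
            (fun line p => PySem.List.pySetD line p (pvDotA matrix_ n p w))
            (List.replicate (m + 1).toNat 0)
        PySem.List.pySetD ans w line)
      (List.replicate m.toNat ([] : List Int))
  (ans, m, m)

-- ===== PORT B =====
-- sum(x * y for x, y in zip(xs, ys))
def pvDotB (xs ys : List Int) : Int := ((xs.zip ys).map (fun q => q.1 * q.2)).sum

def mnk_mat_alt (matrix_ : List (List Int)) (n : Int) (m : Int) : List (List Int) × Int × Int :=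
  if m ≤ 0 then ([], m, m)
  else
    let cols :=
      (PySem.List.pyRange 0 (m + 1) 1).map
        (fun j => (PySem.List.pyRange 0 n 1).map
          (fun r => PySem.List.pyGetD (PySem.List.pyGetD matrix_ r []) j 0))
    let ans :=
      (PySem.List.pyRange 0 m 1).foldl
        (fun ans w =>
          ans ++ [(PySem.List.pyRange 0 w 1).map
                    (fun p => PySem.List.pyGetD (PySem.List.pyGetD ans p []) w 0)
                  ++ (PySem.List.pyRange w (m + 1) 1).map
                    (fun p => pvDotB (PySem.List.pyGetD cols p [])
                                     (PySem.List.pyGetD cols w []))])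
        []
    (ans, m, m)

-- ===== PRECONDITION & SPEC =====
-- Pre_ excludes exactly the inputs on which Python A raises IndexError: m > 0 and n > 0 with
-- fewer than n rows, or some of the first n rows shorter than m+1.
def Pre_mnk_mat (matrix_ : List (List Int)) (n : Int) (m : Int) : Prop :=
  m ≤ 0 ∨ n ≤ 0 ∨ (n ≤ matrix_.length ∧ ∀ row ∈ matrix_.take n.toNat, m + 1 ≤ (row.length : Int))
instance (matrix_ : List (List Int)) (n : Int) (m : Int) : Decidable (Pre_mnk_mat matrix_ n m) := by unfold Pre_mnk_mat; infer_instance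

def pvWitness_mnk_mat : List (List Int) × Int × Int := ([[1, 2], [3, 4]], 2, 1)

def Spec_mnk_mat (matrix_ : List (List Int)) (n : Int) (m : Int) (out : List (List Int) × Int × Int) : Prop := out = mnk_mat_alt matrix_ n m
instance (matrix_ : List (List Int)) (n : Int) (m : Int) (out : List (List Int) × Int × Int) : Decidable (Spec_mnk_mat matrix_ n m out) := by unfold Spec_mnk_mat; infer_instance

-- ===== CLAIM (what is proved, stated in full; the proofs are below) =====
def Claim_equal_mnk_mat : Prop := ∀ (matrix_ : List (List Int)) (n : Int) (m : Int), Dom_mnk_mat matrix_ n m → Pre_mnk_mat matrix_ n m → Spec_mnk_mat matrix_ n m (mnk_mat matrix_ n m)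

-- ===== LEMMAS AND PROOFS =====

-- the Gram dot product is symmetric
theorem pvDotA_comm (matrix_ : List (List Int)) (n p w : Int) :
    pvDotA matrix_ n p w = pvDotA matrix_ n w p := by
  unfold pvDotA
  congr 1
  funext el r
  ring

-- B's zip-dot of two columns equals A's accumulated dot product
theorem pvDotB_cols (matrix_ : List (List Int)) (n p w : Int) :
    pvDotB ((PySem.List.pyRange 0 n 1).map
              (fun r => PySem.List.pyGetD (PySem.List.pyGetD matrix_ r []) p 0))
           ((PySem.List.pyRange 0 n 1).map
              (fun r => PySem.List.pyGetD (PySem.List.pyGetD matrix_ r []) w 0))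
      = pvDotA matrix_ n p w := by
  unfold pvDotB pvDotA
  rw [List.zip_map', List.map_map]
  induction (PySem.List.pyRange 0 n 1) using List.reverseRecOn with
  | nil => simp
  | append_singleton xs x ih => simp [List.foldl_append, ih]

-- a loop that sets each slot of a fresh buffer in order builds the mapped list
theorem foldl_pySetD_replicate {α : Type} (f : Int → α) (d : α) (k : ℕ) :
    ∀ j : ℕ, j ≤ k →
      (PySem.List.pyRange 0 (j : Int) 1).foldl
          (fun l p => PySem.List.pySetD l p (f p)) (List.replicate k d)
        = (PySem.List.pyRange 0 (j : Int) 1).map f ++ List.replicate (k - j) d := by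
  intro j
  induction j with
  | zero => simp
  | succ j ih =>
    intro hj
    have h1 : ((j : Int) + 1) = ((j + 1 : ℕ) : Int) := by push_cast; ring
    rw [← h1, PySem.List.pyRange_one_succ_right (by positivity),
        List.foldl_append, List.map_append, ih (by omega)]
    simp only [List.foldl_cons, List.foldl_nil, List.map_cons, List.map_nil]
    have hlen : ((PySem.List.pyRange 0 (j : Int) 1).map f).length = j := by
      simp [PySem.List.length_pyRange_one]
    have hset : PySem.List.pySetD
        ((PySem.List.pyRange 0 (j : Int) 1).map f ++ List.replicate (k - j) d)
        (j : Int) (f j)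
        = (PySem.List.pyRange 0 (j : Int) 1).map f ++ (f j :: List.replicate (k - (j + 1)) d) := by
      rw [PySem.List.pySetD_natCast, List.set_append]
      have h2 : k - j = (k - (j + 1)) + 1 := by omega
      simp [hlen, h2, List.replicate_succ]
    rw [hset]
    simp [List.append_assoc]

theorem mnk_mat_spec_aux (matrix_ : List (List Int)) (n m : Int) :
    mnk_mat matrix_ n m = mnk_mat_alt matrix_ n m := by
  by_cases hm : m ≤ 0
  · -- both sides are ([], m, m)
    unfold mnk_mat mnk_mat_alt
    rw [if_pos hm]
    simp [PySem.List.pyRange_one_eq_nil hm, Int.toNat_of_nonpos hm]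
  · rw [not_le] at hm
    set k : ℕ := m.toNat with hk
    have hmk : (m : Int) = (k : Int) := by omega
    have hmk1 : (m + 1 : Int) = ((k + 1 : ℕ) : Int) := by push_cast; omega
    -- row w of both results
    set rowSpec : Int → List Int :=
      fun w => (PySem.List.pyRange 0 (m + 1) 1).map (fun p => pvDotA matrix_ n p w) with hrow
    -- A's answer is the mapped rows
    have hA : (mnk_mat matrix_ n m).1 = (PySem.List.pyRange 0 m 1).map rowSpec := by
      unfold mnk_mat
      simp only
      have hinner : ∀ w : Int,
          (PySem.List.pyRange 0 (m + 1) 1).foldl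
            (fun line p => PySem.List.pySetD line p (pvDotA matrix_ n p w))
            (List.replicate (m + 1).toNat 0) = rowSpec w := by
        intro w
        rw [hrow]
        have h1 : (m + 1).toNat = k + 1 := by omega
        rw [h1, hmk1]
        simpa using foldl_pySetD_replicate (fun p => pvDotA matrix_ n p w) 0 (k + 1) (k + 1) le_rfl
      calc (PySem.List.pyRange 0 m 1).foldl
              (fun ans w => PySem.List.pySetD ans w
                ((PySem.List.pyRange 0 (m + 1) 1).foldl
                  (fun line p => PySem.List.pySetD line p (pvDotA matrix_ n p w))
                  (List.replicate (m + 1).toNat 0)))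
              (List.replicate m.toNat ([] : List Int))
          = (PySem.List.pyRange 0 m 1).foldl
              (fun ans w => PySem.List.pySetD ans w (rowSpec w))
              (List.replicate k ([] : List Int)) := by
            congr 1
            funext ans w
            rw [hinner]
        _ = (PySem.List.pyRange 0 m 1).map rowSpec := by
            rw [hmk]
            simpa using foldl_pySetD_replicate rowSpec ([] : List Int) k k le_rfl
    -- B's answer is the same mapped rows
    have hB : (mnk_mat_alt matrix_ n m).1 = (PySem.List.pyRange 0 m 1).map rowSpec := by
      unfold mnk_mat_alt
      rw [if_neg (by omega)]
      simp only
      set cols := (PySem.List.pyRange 0 (m + 1) 1).map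
        (fun j => (PySem.List.pyRange 0 n 1).map
          (fun r => PySem.List.pyGetD (PySem.List.pyGetD matrix_ r []) j 0)) with hcols
      have hcol : ∀ p : Int, 0 ≤ p → p < m + 1 →
          PySem.List.pyGetD cols p [] = (PySem.List.pyRange 0 n 1).map
            (fun r => PySem.List.pyGetD (PySem.List.pyGetD matrix_ r []) p 0) := by
        intro p h0 h1
        rw [hcols, PySem.List.pyGetD_map_pyRange_of_nonneg _ _ _ _ h0 h1]
      have hinv : ∀ j : ℕ, (j : Int) ≤ m →
          (PySem.List.pyRange 0 (j : Int) 1).foldl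
            (fun ans w =>
              ans ++ [(PySem.List.pyRange 0 w 1).map
                        (fun p => PySem.List.pyGetD (PySem.List.pyGetD ans p []) w 0)
                      ++ (PySem.List.pyRange w (m + 1) 1).map
                        (fun p => pvDotB (PySem.List.pyGetD cols p [])
                                         (PySem.List.pyGetD cols w []))])
            []
          = (PySem.List.pyRange 0 (j : Int) 1).map rowSpec := by
        intro j
        induction j with
        | zero => simp
        | succ j ih =>
          intro hj
          have hj' : (j : Int) ≤ m := by push_cast at hj ⊢; omega
          have h1 : ((j : Int) + 1) = ((j + 1 : ℕ) : Int) := by push_cast; ring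
          rw [← h1, PySem.List.pyRange_one_succ_right (by positivity),
              List.foldl_append, List.map_append, ih hj']
          simp only [List.foldl_cons, List.foldl_nil, List.map_cons, List.map_nil]
          congr 1
          -- the new row equals rowSpec j
          have hjm : (j : Int) < m := by push_cast at hj; omega
          have part1 : (PySem.List.pyRange 0 (j : Int) 1).map
              (fun p => PySem.List.pyGetD
                (PySem.List.pyGetD ((PySem.List.pyRange 0 (j : Int) 1).map rowSpec) p []) (j : Int) 0)
              = (PySem.List.pyRange 0 (j : Int) 1).map (fun p => pvDotA matrix_ n p j) := by
            apply List.map_congr_left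
            intro p hp
            rw [PySem.List.mem_pyRange_one] at hp
            rw [PySem.List.pyGetD_map_pyRange_of_nonneg _ _ _ _ hp.1 hp.2]
            rw [hrow]
            rw [PySem.List.pyGetD_map_pyRange_of_nonneg _ _ _ _ (by positivity) (by omega)]
            exact pvDotA_comm matrix_ n (j : Int) p
          have part2 : (PySem.List.pyRange (j : Int) (m + 1) 1).map
              (fun p => pvDotB (PySem.List.pyGetD cols p []) (PySem.List.pyGetD cols (j : Int) []))
              = (PySem.List.pyRange (j : Int) (m + 1) 1).map (fun p => pvDotA matrix_ n p j) := by
            apply List.map_congr_left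
            intro p hp
            rw [PySem.List.mem_pyRange_one] at hp
            have hp0 : (0 : Int) ≤ p := le_trans (by positivity) hp.1
            rw [hcol p hp0 hp.2, hcol (j : Int) (by positivity) (by omega)]
            exact pvDotB_cols matrix_ n p (j : Int)
          rw [part1, part2, hrow, ← List.map_append, ← PySem.List.pyRange_one_append 0 (j : Int) (m + 1) (by positivity) (by omega)]
      rw [show PySem.List.pyRange 0 m 1 = PySem.List.pyRange 0 (k : Int) 1 from by rw [hmk]]
      exact hinv k (by omega)
    -- assemble
    have : (mnk_mat matrix_ n m).1 = (mnk_mat_alt matrix_ n m).1 := by rw [hA, hB]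
    unfold mnk_mat mnk_mat_alt at this ⊢
    rw [if_neg (by omega)] at this ⊢
    simp only at this
    exact Prod.ext this rfl

-- ===== VERDICT (by name: the statement is the Claim_ definition above) =====
theorem mnk_mat_spec : Claim_equal_mnk_mat := by
  intro matrix_ n m _ _
  unfold Spec_mnk_mat
  exact mnk_mat_spec_aux matrix_ n m
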